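-- pv_equiv track=rewrite | github.com/thechemist54/DSwithPython | assignment_6/problem_6.py | word_is_valid
-- ===== SOURCE A (Python) =====
-- def into_dictionary(sequence):
--     """
--     Returns a dictionary where the keys are elements of the sequence
--     and the values are integer counts, for the number of times that
--     an element is repeated in the sequence.
--     sequence: str or list
--     return: dictionary
--     """
--     # freqs: dictionary (values type: int)
--     freq = {}
--     for letter in sequence:
--         freq[letter] = freq.get(letter, 0) + 1
--     return freq
--
-- def word_is_valid(word, hand, word_list):
--     """
--     Returns boolean
--     if all the letters in the word played are in the hand
--     and
--     if the word is in the wordlist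
--     returns true
--     if either false, returns false
--     word: string
--     hand: dictionary (string -> int)
--     word_list: list of lowercase words
--     """
--     # Check if the word is in the word list
--     if word not in word_list:
--         return False
--
--     # Convert the word into a dictionary of letter frequencies
--     word_dict = into_dictionary(word)
--
--     # Check if all letters of the word can be found in the player's hand
--     for letter, freq in word_dict.items():
--         if hand.get(letter, 0) < freq:
--             return False
--
--     return True
-- ===== SOURCE B (Python) =====
-- def word_is_valid(word, hand, word_list):
--     if word not in word_list:
--         return False
--     remaining = dict(hand)
--     for letter in word:
--         if remaining.get(letter, 0) <= 0:
--             return False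
--         remaining[letter] -= 1
--     return True
-- ===== Notes on version B (the rewrite author's own statement) =====
-- stated objective: alternative
-- what changed: B replaces A's build-a-frequency-dictionary-then-compare-aggregates pass with a single pass over the word that decrements a working copy of the hand and fails on the first missing letter; the caller's hand is not mutated.
import Mathlib
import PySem

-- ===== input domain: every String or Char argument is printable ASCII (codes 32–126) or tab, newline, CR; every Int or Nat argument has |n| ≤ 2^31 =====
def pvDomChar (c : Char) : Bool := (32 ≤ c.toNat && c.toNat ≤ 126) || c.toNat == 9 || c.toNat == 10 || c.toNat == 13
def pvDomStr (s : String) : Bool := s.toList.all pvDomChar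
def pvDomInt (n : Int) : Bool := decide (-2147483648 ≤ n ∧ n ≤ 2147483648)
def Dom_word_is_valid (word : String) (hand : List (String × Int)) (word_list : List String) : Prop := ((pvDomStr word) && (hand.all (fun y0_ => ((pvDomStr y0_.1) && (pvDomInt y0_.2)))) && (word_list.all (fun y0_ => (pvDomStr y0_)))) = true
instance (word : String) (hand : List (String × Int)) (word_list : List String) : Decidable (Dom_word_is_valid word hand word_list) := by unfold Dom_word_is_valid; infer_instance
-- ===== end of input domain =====

-- B consumes a working copy of the hand in one pass over the word (fail on the first
-- letter that runs out) instead of A's frequency-dictionary-then-compare-aggregates.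
-- Return-value equivalence; neither implementation mutates the caller's hand.

-- Python iterates a string as length-1 strings; this is that letter-to-key step (shared typing helper).
def pvLetterKey (c : Char) : String := String.mk [c]

-- ===== PORT A =====
def pvIntoDictionary (sequence : List String) : PySem.Dict String Int :=
  sequence.foldl (fun freq letter => freq.insert letter (freq.getD letter 0 + 1)) PySem.Dict.empty

def pvCheckHand (hand : PySem.Dict String Int) : List (String × Int) → Bool
  | [] => true
  | (letter, freq) :: rest => if hand.getD letter 0 < freq then false else pvCheckHand hand rest

def word_is_valid (word : String) (hand : List (String × Int)) (word_list : List String) : Bool :=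
  if !(word_list.contains word) then false
  else pvCheckHand (PySem.Dict.ofList hand) (pvIntoDictionary (word.toList.map pvLetterKey)).items

-- ===== PORT B =====
def pvConsume : List String → PySem.Dict String Int → Bool
  | [], _ => true
  | letter :: rest, remaining =>
    if remaining.getD letter 0 ≤ 0 then false
    else pvConsume rest (remaining.insert letter (remaining.getD letter 0 - 1))

def word_is_valid_alt (word : String) (hand : List (String × Int)) (word_list : List String) : Bool :=
  if !(word_list.contains word) then false
  else pvConsume (word.toList.map pvLetterKey) (PySem.Dict.ofList hand)

-- ===== PRECONDITION & SPEC =====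
def Spec_word_is_valid (word : String) (hand : List (String × Int)) (word_list : List String) (out : Bool) : Prop := out = word_is_valid_alt word hand word_list
instance (word : String) (hand : List (String × Int)) (word_list : List String) (out : Bool) : Decidable (Spec_word_is_valid word hand word_list out) := by unfold Spec_word_is_valid; infer_instance

-- ===== CLAIM (what is proved, stated in full; the proofs are below) =====
def Claim_equal_word_is_valid : Prop := ∀ (word : String) (hand : List (String × Int)) (word_list : List String), Dom_word_is_valid word hand word_list → Spec_word_is_valid word hand word_list (word_is_valid word hand word_list)

-- ===== LEMMAS AND PROOFS =====

-- A's hand-check loop is the "all counts fit" condition.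
theorem pvCheckHand_iff (h : PySem.Dict String Int) (items : List (String × Int)) :
    pvCheckHand h items = true ↔ ∀ p ∈ items, ¬ (h.getD p.1 0 < p.2) := by
  induction items with
  | nil => simp [pvCheckHand]
  | cons p rest ih =>
    obtain ⟨l, f⟩ := p
    by_cases hc : h.getD l 0 < f
    · simp [pvCheckHand, hc]
    · simp only [pvCheckHand, if_neg hc, ih, List.mem_cons]
      constructor
      · rintro hall q (rfl | hq)
        · exact hc
        · exact hall q hq
      · intro hall q hq
        exact hall q (Or.inr hq)

-- B's consuming loop succeeds iff every letter occurs in the word no more often than the hand holds it.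
theorem pvConsume_iff (ws : List String) (h : PySem.Dict String Int) :
    pvConsume ws h = true ↔ ∀ k ∈ ws, (ws.count k : Int) ≤ h.getD k 0 := by
  induction ws generalizing h with
  | nil => simp [pvConsume]
  | cons l rest ih =>
    by_cases hle : h.getD l 0 ≤ 0
    · simp only [pvConsume, if_pos hle]
      constructor
      · intro hfalse; cases hfalse
      · intro hall
        have h1 := hall l (by simp)
        rw [List.count_cons_self] at h1
        have h0 : (0:Int) ≤ (rest.count l : Int) := by positivity
        push_cast at h1; omega
    · simp only [pvConsume, if_neg hle, ih]
      constructor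
      · intro hall k hk
        by_cases hkl : k = l
        · subst hkl
          rw [List.count_cons_self]
          by_cases hkr : k ∈ rest
          · have h1 := hall k hkr
            rw [PySem.Dict.getD_insert, if_pos rfl] at h1
            push_cast; omega
          · rw [List.count_eq_zero_of_not_mem hkr]
            push_cast; omega
        · have hk' : k ∈ rest := (List.mem_cons.mp hk).resolve_left hkl
          have h1 := hall k hk'
          rw [PySem.Dict.getD_insert, if_neg hkl] at h1
          rw [List.count_cons_of_ne (fun he => hkl he.symm)]
          exact h1
      · intro hall k hk
        rw [PySem.Dict.getD_insert]
        by_cases hkl : k = l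
        · subst hkl
          have h1 := hall k (by simp)
          rw [List.count_cons_self] at h1
          rw [if_pos rfl]
          push_cast at h1; omega
        · have h1 := hall k (List.mem_cons.mpr (Or.inr hk))
          rw [List.count_cons_of_ne (fun he => hkl he.symm)] at h1
          rw [if_neg hkl]
          exact h1

-- The two hand checks agree for every word and every hand dictionary.
theorem check_eq_consume (ws : List String) (h : PySem.Dict String Int) :
    pvCheckHand h (pvIntoDictionary ws).items = pvConsume ws h := by
  rw [Bool.eq_iff_iff, pvCheckHand_iff, pvConsume_iff]
  have hdict : pvIntoDictionary ws = PySem.Dict.counter ws :=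
    PySem.Dict.foldl_insert_getD_add_one_eq_counter ws
  rw [hdict, PySem.Dict.items_counter]
  constructor
  · intro hall k hk
    have h1 := hall (k, (ws.count k : Int))
      (List.mem_map.mpr ⟨k, (PySem.Set.mem_ofList ws k).mpr hk, rfl⟩)
    simp only [not_lt] at h1
    exact h1
  · intro hall p hp
    rcases List.mem_map.mp hp with ⟨k, hk, rfl⟩
    have h1 := hall k ((PySem.Set.mem_ofList ws k).mp hk)
    simp only [not_lt]
    exact h1

-- ===== VERDICT (by name: the statement is the Claim_ definition above) =====
theorem word_is_valid_spec : Claim_equal_word_is_valid := by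
  intro word hand word_list _
  unfold Spec_word_is_valid word_is_valid word_is_valid_alt
  rw [check_eq_consume]
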